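-- pv_equiv track=rewrite | github.com/yoonmyunghoon/JDI | 알고리즘/프로그래머스/월간 코드 챌린지 시즌1/9월/3.py | solution
-- ===== SOURCE A (Python) =====
-- def solution(a):
--     answer = 0
--     if len(a) < 3:
--         answer = len(a)
--     else:
--         for i in range(1, len(a)-1):
--             check = 0
--             x1 = i
--             x2 = i
--             while 1:
--                 x1 -= 1
--                 if a[x1] < a[i]:
--                     check += 1
--                     break
--                 if x1 == 0:
--                     break
--             while 1:
--                 x2 += 1
--                 if a[x2] < a[i]:
--                     check += 1
--                     break
--                 if x2 == len(a)-1: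
--                     break
--             if check == 2:
--                 answer += 1
--         answer = len(a) - answer
--     return answer
-- ===== SOURCE B (Python) =====
-- def solution(a):
--     n = len(a)
--     if n < 3:
--         return n
--     pref = []
--     m = a[0]
--     for x in a:
--         pref.append(m)
--         m = min(m, x)
--     suf = []
--     m = a[-1]
--     for x in reversed(a):
--         suf.append(m)
--         m = min(m, x)
--     suf.reverse()
--     cnt = 0
--     for i in range(1, n - 1):
--         if pref[i] < a[i] and suf[i] < a[i]:
--             cnt += 1
--     return n - cnt
-- ===== Notes on version B (the rewrite author's own statement) =====
-- stated objective: faster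
-- what changed: Replaced the per-index left/right while-loop scans with exclusive prefix-min and suffix-min arrays built in one pass each, giving an O(1) check per index.
import Mathlib
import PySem

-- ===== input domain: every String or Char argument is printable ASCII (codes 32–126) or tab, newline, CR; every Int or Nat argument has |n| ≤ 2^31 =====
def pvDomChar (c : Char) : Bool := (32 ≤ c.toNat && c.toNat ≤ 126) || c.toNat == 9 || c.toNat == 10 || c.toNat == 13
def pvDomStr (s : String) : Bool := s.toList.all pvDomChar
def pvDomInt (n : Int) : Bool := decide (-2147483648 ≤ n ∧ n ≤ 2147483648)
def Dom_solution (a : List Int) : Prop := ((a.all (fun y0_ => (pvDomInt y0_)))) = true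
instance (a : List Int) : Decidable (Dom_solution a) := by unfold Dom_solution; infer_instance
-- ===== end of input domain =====

-- B replaces A's per-index left/right while-loop scans (O(n^2)) by one-pass
-- exclusive prefix-min and suffix-min arrays with an O(1) check per index (O(n)).

-- ===== PORT A =====
-- the first while loop: x1 starts at i, decrements, stops on a[x1] < v or x1 == 0
def scanL (a : List Int) (v : Int) : Nat → Int
  | 0 => 0
  | x + 1 => if a.getD x 0 < v then 1 else if x = 0 then 0 else scanL a v x

-- the second while loop: x2 increments from i, stops on a[x2] < v or x2 == len(a)-1;
-- fuel = (len(a)-1) - x2 bounds the remaining steps (the loop ends by then)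
def scanR (a : List Int) (v : Int) : Nat → Nat → Int
  | _, 0 => 0
  | x2, fuel + 1 =>
      if a.getD (x2 + 1) 0 < v then 1
      else if x2 + 1 = a.length - 1 then 0
      else scanR a v (x2 + 1) fuel

def solution (a : List Int) : Int :=
  let n := a.length
  if n < 3 then (n : Int)
  else
    let answer := ((List.range (n - 2)).map (· + 1)).foldl (fun acc i =>
      let check := scanL a (a.getD i 0) i + scanR a (a.getD i 0) i (n - 1 - i)
      if check = 2 then acc + 1 else acc) 0
    (n : Int) - answer

-- ===== PORT B =====
-- one step of the running-minimum pass: append the current min, then update it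
def prefStep (st : List Int × Int) (x : Int) : List Int × Int := (st.1 ++ [st.2], min st.2 x)

def solution_alt (a : List Int) : Int :=
  let n := a.length
  if n < 3 then (n : Int)
  else
    let pref := (a.foldl prefStep ([], a.getD 0 0)).1
    let suf := ((a.reverse.foldl prefStep ([], a.getD (n - 1) 0)).1).reverse
    let cnt := ((List.range (n - 2)).map (· + 1)).foldl (fun acc i =>
      if pref.getD i 0 < a.getD i 0 ∧ suf.getD i 0 < a.getD i 0 then acc + 1 else acc) 0
    (n : Int) - cnt

-- ===== PRECONDITION & SPEC =====
def Spec_solution (a : List Int) (out : Int) : Prop := out = solution_alt a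
instance (a : List Int) (out : Int) : Decidable (Spec_solution a out) := by unfold Spec_solution; infer_instance

-- ===== CLAIM (what is proved, stated in full; the proofs are below) =====
def Claim_equal_solution : Prop := ∀ (a : List Int), Dom_solution a → Spec_solution a (solution a)

-- ===== LEMMAS AND PROOFS =====

-- proof-side model of the running-minimum list
def prefAux (m : Int) : List Int → List Int
  | [] => []
  | x :: xs => m :: prefAux (min m x) xs

theorem prefAux_length (l : List Int) : ∀ m, (prefAux m l).length = l.length := by
  induction l with
  | nil => intro m; rfl
  | cons x xs ih => intro m; simp [prefAux, ih]

theorem prefFold_eq (l : List Int) : ∀ (acc : List Int) (m : Int),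
    (l.foldl prefStep (acc, m)).1 = acc ++ prefAux m l := by
  induction l with
  | nil => intro acc m; simp [prefAux]
  | cons x xs ih => intro acc m; simp [prefStep, prefAux, ih]

theorem prefAux_getD (l : List Int) : ∀ (m : Int) (i : Nat), i < l.length →
    (prefAux m l).getD i 0 = List.foldl min m (l.take i) := by
  induction l with
  | nil => intro m i h; simp at h
  | cons x xs ih =>
    intro m i h
    cases i with
    | zero => simp [prefAux]
    | succ j =>
      simp only [prefAux, List.getD_cons_succ, List.take_succ_cons, List.foldl_cons]
      exact ih (min m x) j (by simpa using h)

theorem foldl_min_lt (v : Int) (l : List Int) : ∀ m : Int,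
    (List.foldl min m l < v ↔ m < v ∨ ∃ x ∈ l, x < v) := by
  induction l with
  | nil => intro m; simp
  | cons x xs ih =>
    intro m
    simp only [List.foldl_cons, ih (min m x), min_lt_iff, List.mem_cons]
    constructor
    · rintro (h | ⟨y, hy, hv⟩)
      · tauto
      · exact Or.inr ⟨y, Or.inr hy, hv⟩
    · rintro (h | ⟨y, rfl | hy, hv⟩)
      · tauto
      · tauto
      · exact Or.inr ⟨y, hy, hv⟩

theorem mem_take_lt (a : List Int) (i : Nat) (v : Int) (hi : i ≤ a.length) :
    (∃ x ∈ a.take i, x < v) ↔ (∃ j, j < i ∧ a.getD j 0 < v) := by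
  constructor
  · rintro ⟨x, hx, hv⟩
    rcases List.mem_iff_getElem.mp hx with ⟨j, hj, rfl⟩
    have hj' : j < i := lt_of_lt_of_le hj (by simp)
    refine ⟨j, hj', ?_⟩
    have hja : j < a.length := lt_of_lt_of_le hj' hi
    rw [List.getD_eq_getElem _ _ hja]
    simpa [List.getElem_take] using hv
  · rintro ⟨j, hj, hv⟩
    have hja : j < a.length := lt_of_lt_of_le hj hi
    refine ⟨a[j], ?_, by rwa [List.getD_eq_getElem _ _ hja] at hv⟩
    have hlt : j < (a.take i).length := by simp; omega
    have : (a.take i)[j]'hlt = a[j] := List.getElem_take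
    exact this ▸ List.getElem_mem hlt

theorem scanL_eq (a : List Int) (v : Int) : ∀ i, 1 ≤ i → i ≤ a.length →
    scanL a v i = if List.foldl min (a.getD 0 0) (a.take i) < v then 1 else 0 := by
  intro i
  induction i with
  | zero => intro h; omega
  | succ x ih =>
    intro _ hle
    cases Nat.eq_zero_or_pos x with
    | inl hx =>
      subst hx
      rcases a with _ | ⟨b, bs⟩
      · simp at hle
      · simp only [scanL, List.getD_cons_zero, List.take_succ_cons, List.take_zero,
          List.foldl_cons, List.foldl_nil, min_self]
        by_cases hv : b < v <;> simp [hv]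
    | inr hx =>
      have hxa : x < a.length := by omega
      have htake : a.take (x + 1) = a.take x ++ [a.getD x 0] := by
        rw [List.take_add_one, List.getElem?_eq_getElem hxa, List.getD_eq_getElem _ _ hxa]
        rfl
      rw [htake]
      simp only [scanL, List.foldl_append, List.foldl_cons, List.foldl_nil]
      by_cases hv : a.getD x 0 < v
      · rw [if_pos hv, if_pos (lt_of_le_of_lt (min_le_right _ _) hv)]
      · have hne : ¬ x = 0 := by omega
        rw [if_neg hv, if_neg hne, ih hx hxa.le]
        have hiff : min (List.foldl min (a.getD 0 0) (a.take x)) (a.getD x 0) < v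
            ↔ List.foldl min (a.getD 0 0) (a.take x) < v := by
          rw [min_lt_iff]; tauto
        rw [if_congr hiff rfl rfl]

theorem scanR_eq (a : List Int) (v : Int) : ∀ fuel x2, 1 ≤ fuel → x2 + fuel = a.length - 1 →
    1 ≤ a.length →
    scanR a v x2 fuel
      = if (∃ j, j < a.length ∧ x2 < j ∧ a.getD j 0 < v) then 1 else 0 := by
  intro fuel
  induction fuel with
  | zero => intro x2 h; omega
  | succ f ih =>
    intro x2 _ hsum hlen
    simp only [scanR]
    by_cases hv : a.getD (x2 + 1) 0 < v
    · rw [if_pos hv, if_pos ⟨x2 + 1, by omega, by omega, hv⟩]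
    · rw [if_neg hv]
      cases Nat.eq_zero_or_pos f with
      | inl hf =>
        subst hf
        rw [if_pos (by omega : x2 + 1 = a.length - 1)]
        rw [if_neg]
        rintro ⟨j, hj1, hj2, hj3⟩
        have : j = x2 + 1 := by omega
        subst this; exact hv hj3
      | inr hf =>
        rw [if_neg (by omega : ¬ x2 + 1 = a.length - 1), ih (x2 + 1) hf (by omega) hlen]
        refine if_congr ?_ rfl rfl
        constructor
        · rintro ⟨j, hj1, hj2, hj3⟩; exact ⟨j, hj1, by omega, hj3⟩
        · rintro ⟨j, hj1, hj2, hj3⟩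
          refine ⟨j, hj1, ?_, hj3⟩
          rcases Nat.eq_or_lt_of_le hj2 with h | h
          · exfalso; rw [← h] at hj3; exact hv hj3
          · omega

-- the right-hand while loop computes exactly "suffix min below a[i]"
theorem sufMin_lt_iff (a : List Int) (v : Int) (i : Nat) (hi : i + 2 ≤ a.length) :
    (List.foldl min (a.getD (a.length - 1) 0) (a.reverse.take (a.length - 1 - i)) < v
      ↔ ∃ j, j < a.length ∧ i < j ∧ a.getD j 0 < v) := by
  rw [foldl_min_lt, mem_take_lt a.reverse (a.length - 1 - i) v (by simp; omega)]
  have hrev : ∀ k, k < a.length → a.reverse.getD k 0 = a.getD (a.length - 1 - k) 0 := by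
    intro k hk
    rw [List.getD_eq_getElem _ _ (by simpa using hk),
        List.getD_eq_getElem _ _ (by omega : a.length - 1 - k < a.length)]
    simp [List.getElem_reverse]
  constructor
  · rintro (h | ⟨k, hk, hv⟩)
    · exact ⟨a.length - 1, by omega, by omega, h⟩
    · have hk' : k < a.length := by omega
      refine ⟨a.length - 1 - k, by omega, by omega, ?_⟩
      rw [← hrev k hk']; exact hv
  · rintro ⟨j, hj2, hj1, hv⟩
    right
    refine ⟨a.length - 1 - j, by omega, ?_⟩
    rw [hrev (a.length - 1 - j) (by omega), (by omega : a.length - 1 - (a.length - 1 - j) = j)]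
    exact hv

theorem scanR_suf (a : List Int) (v : Int) (i : Nat) (h1 : 1 ≤ i) (h2 : i + 2 ≤ a.length) :
    scanR a v i (a.length - 1 - i)
      = if List.foldl min (a.getD (a.length - 1) 0) (a.reverse.take (a.length - 1 - i)) < v
        then 1 else 0 := by
  rw [scanR_eq a v (a.length - 1 - i) i (by omega) (by omega) (by omega)]
  exact if_congr (sufMin_lt_iff a v i h2).symm rfl rfl

theorem prefAux_rev_getD (l : List Int) (m : Int) (i : Nat) (h : i < l.length) :
    ((prefAux m l).reverse).getD i 0 = List.foldl min m (l.take (l.length - 1 - i)) := by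
  have hlp : (prefAux m l).length = l.length := prefAux_length l m
  have hi' : i < (prefAux m l).reverse.length := by rw [List.length_reverse, hlp]; exact h
  rw [List.getD_eq_getElem _ _ hi', List.getElem_reverse]
  rw [← List.getD_eq_getElem _ 0 (by rw [hlp]; omega : (prefAux m l).length - 1 - i < (prefAux m l).length)]
  rw [hlp]
  exact prefAux_getD l m _ (by omega)

theorem foldl_congr_list {α β : Type} (l : List α) (f g : β → α → β) :
    ∀ (b : β), (∀ x ∈ l, ∀ acc, f acc x = g acc x) → l.foldl f b = l.foldl g b := by
  induction l with
  | nil => intro b _; rfl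
  | cons x xs ih =>
    intro b h
    simp only [List.foldl_cons]
    rw [h x (List.mem_cons_self) b]
    exact ih _ (fun y hy acc => h y (List.mem_cons_of_mem _ hy) acc)

-- ===== VERDICT (by name: the statement is the Claim_ definition above) =====
theorem solution_spec : Claim_equal_solution := by
  intro a _
  unfold Spec_solution solution solution_alt
  by_cases hn : a.length < 3
  · simp [hn]
  · simp only [if_neg hn]
    congr 1
    apply foldl_congr_list
    intro i hi acc
    simp only [List.mem_map, List.mem_range] at hi
    obtain ⟨j, hj, rfl⟩ := hi
    have h1 : 1 ≤ j + 1 := by omega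
    have h2 : j + 1 + 2 ≤ a.length := by omega
    rw [scanL_eq a (a.getD (j + 1) 0) (j + 1) h1 (by omega),
        scanR_suf a (a.getD (j + 1) 0) (j + 1) h1 h2,
        prefFold_eq, prefFold_eq, List.nil_append, List.nil_append,
        prefAux_getD a _ (j + 1) (by omega),
        prefAux_rev_getD a.reverse _ (j + 1) (by rw [List.length_reverse]; omega),
        List.length_reverse]
    by_cases hL : List.foldl min (a.getD 0 0) (a.take (j + 1)) < a.getD (j + 1) 0 <;>
    by_cases hR : List.foldl min (a.getD (a.length - 1) 0)
        (a.reverse.take (a.length - 1 - (j + 1))) < a.getD (j + 1) 0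
    · rw [if_pos hL, if_pos hR]; norm_num; exact ⟨hL, hR⟩
    · rw [if_pos hL, if_neg hR]; norm_num; exact fun _ => not_lt.mp hR
    · rw [if_neg hL, if_pos hR]; norm_num; exact fun h => absurd h hL
    · rw [if_neg hL, if_neg hR]; norm_num; exact fun h => absurd h hL
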